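-- pv_equiv track=rewrite | github.com/zulip/zulip-gci | tutorials/tic_tac_toe.py | square_value
-- ===== SOURCE A (Python) =====
-- CORNERS = {1, 3, 7, 9}
--
-- TRIPLETS = dict(
--     row1 = {1, 2, 3},
--     row2 = {4, 5, 6},
--     row3 = {7, 8, 9},
--
--     col1 = {1, 4, 7},
--     col2 = {2, 5, 8},
--     col3 = {3, 6, 9},
--
--     diag1 = {1, 5, 9},
--     diag2 = {3, 5, 7},
-- )
--
-- def claimed_squares(moves, player):
--     return {square for p, square in moves
--         if p == player}
--
-- def triplet_status(triplet_name, moves):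
--     squares = TRIPLETS[triplet_name]
--     def count(player):
--         return len(claimed_squares(moves, player).intersection(squares))
--
--     return {player: count(player) for player in 'XO'}
--
-- def game_status(moves):
--     return {
--         triplet_name: triplet_status(triplet_name, moves)
--         for triplet_name in TRIPLETS
--     }
--
-- def opponent(player):
--     return {'X': 'O', 'O': 'X'}[player]
--
-- def in_an_xox_diag_attack(moves):
--     squares = [square for _, square in moves]
--     return squares in [
--         [1, 5, 9],
--         [9, 5, 1],
--         [7, 5, 3],
--         [3, 5, 7],
--     ]
--
-- def square_value(moves, player, square):
--     statuses = [
--         status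
--         for triplet_name, status in game_status(moves).items()
--         if square in TRIPLETS[triplet_name]
--     ]
--     opp = opponent(player)
--
--     value_matrix = {
--         0: {0:    1,    1: 100,     2: 800},
--         1: {0:   50,    1:   0},
--         2: {0: 3000},
--     }
--
--     value = 0
--     for status in statuses:
--         my_count = status[player]
--         opp_count = status[opp]
--         value += value_matrix[my_count][opp_count]
--
--     if in_an_xox_diag_attack(moves) and square in CORNERS:
--         return 0
--
--     return value
-- ===== SOURCE B (Python) =====
-- # B: single pass over the moves with per-line counters updated incrementally
-- # (a seen-set skips duplicate moves), instead of A's staged passes that build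
-- # player sets and intersect them with every triplet.
--
-- TRIPLET_SETS = [
--     {1, 2, 3}, {4, 5, 6}, {7, 8, 9},
--     {1, 4, 7}, {2, 5, 8}, {3, 6, 9},
--     {1, 5, 9}, {3, 5, 7},
-- ]
--
-- VALUE_MATRIX = {
--     0: {0:    1,    1: 100,     2: 800},
--     1: {0:   50,    1:   0},
--     2: {0: 3000},
-- }
--
-- XOX_DIAGS = [[1, 5, 9], [9, 5, 1], [7, 5, 3], [3, 5, 7]]
--
-- CORNERS = {1, 3, 7, 9}
--
--
-- def _bump(entry, move, player, opp):
--     t, mine, theirs = entry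
--     if move[1] not in t:
--         return entry
--     if move[0] == player:
--         return (t, mine + 1, theirs)
--     if move[0] == opp:
--         return (t, mine, theirs + 1)
--     return entry
--
--
-- def square_value(moves, player, square):
--     opp = {'X': 'O', 'O': 'X'}[player]
--     state = [(t, 0, 0) for t in TRIPLET_SETS if square in t]
--     seen = set()
--     for move in moves:
--         if move not in seen:
--             seen.add(move)
--             state = [_bump(e, move, player, opp) for e in state]
--     value = sum(VALUE_MATRIX[mine][theirs] for _, mine, theirs in state)
--     if square in CORNERS and [s for _, s in moves] in XOX_DIAGS:
--         return 0
--     return value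
-- ===== Notes on version B (the rewrite author's own statement) =====
-- stated objective: alternative
-- what changed: B replaces A's staged passes (build each player's claimed-square set, intersect it with every one of the 8 triplets, then filter the statuses) by a single pass over the moves that incrementally updates a (mine, theirs) counter pair for each line through the square, skipping duplicate moves with a seen-set, then sums value_matrix entries over those counters.
import Mathlib
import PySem

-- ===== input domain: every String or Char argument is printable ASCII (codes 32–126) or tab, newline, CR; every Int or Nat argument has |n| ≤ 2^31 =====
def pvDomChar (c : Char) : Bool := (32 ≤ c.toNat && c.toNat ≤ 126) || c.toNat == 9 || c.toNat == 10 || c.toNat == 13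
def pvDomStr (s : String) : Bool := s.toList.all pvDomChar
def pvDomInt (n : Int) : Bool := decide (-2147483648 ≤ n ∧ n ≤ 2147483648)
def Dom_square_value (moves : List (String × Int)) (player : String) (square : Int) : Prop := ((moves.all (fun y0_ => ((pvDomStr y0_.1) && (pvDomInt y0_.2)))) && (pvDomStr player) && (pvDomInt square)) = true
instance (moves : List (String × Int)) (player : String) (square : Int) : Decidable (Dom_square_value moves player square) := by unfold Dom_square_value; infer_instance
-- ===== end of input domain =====

-- B makes a single pass over the moves, updating per-line (mine, theirs) counters
-- incrementally (with a seen-set for duplicate moves), instead of A's staged passes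
-- that build player sets and intersect them with all 8 triplets (objective: alternative;
-- return value only, no mutation).

-- ===== PORT A =====
def pyCORNERS : PySem.Set Int := PySem.Set.ofList [1,3,7,9]

def pyTRIPLETS : PySem.Dict String (PySem.Set Int) :=
  PySem.Dict.ofList [("row1", PySem.Set.ofList [1,2,3]), ("row2", PySem.Set.ofList [4,5,6]),
    ("row3", PySem.Set.ofList [7,8,9]), ("col1", PySem.Set.ofList [1,4,7]),
    ("col2", PySem.Set.ofList [2,5,8]), ("col3", PySem.Set.ofList [3,6,9]),
    ("diag1", PySem.Set.ofList [1,5,9]), ("diag2", PySem.Set.ofList [3,5,7])]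

def claimed_squares (moves : List (String × Int)) (player : String) : PySem.Set Int :=
  PySem.Set.ofList ((moves.filter (fun m => m.1 == player)).map (·.2))

def triplet_status (triplet_name : String) (moves : List (String × Int)) : PySem.Dict String Int :=
  -- TRIPLETS[triplet_name]: the callers only pass keys of TRIPLETS, so getD's default is never used
  let squares := (pyTRIPLETS.get? triplet_name).getD PySem.Set.empty
  let count := fun (player : String) =>
    (PySem.Set.len (PySem.Set.inter (claimed_squares moves player) squares) : Int)
  ["X", "O"].foldl (fun d p => d.insert p (count p)) PySem.Dict.empty

def game_status (moves : List (String × Int)) : PySem.Dict String (PySem.Dict String Int) :=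
  pyTRIPLETS.keys.foldl (fun d n => d.insert n (triplet_status n moves)) PySem.Dict.empty

-- KeyError (player not 'X'/'O') is excluded by Pre_; getD's default is never used inside Pre_
def py_opponent (player : String) : String :=
  ((PySem.Dict.ofList [("X","O"),("O","X")]).get? player).getD ""

def in_an_xox_diag_attack (moves : List (String × Int)) : Bool :=
  let squares := moves.map (·.2)
  [[1,5,9],[9,5,1],[7,5,3],[3,5,7]].contains squares

def value_matrix_A : PySem.Dict Int (PySem.Dict Int Int) :=
  PySem.Dict.ofList [(0, PySem.Dict.ofList [(0,1),(1,100),(2,800)]),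
                     (1, PySem.Dict.ofList [(0,50),(1,0)]),
                     (2, PySem.Dict.ofList [(0,3000)])]

def square_value (moves : List (String × Int)) (player : String) (square : Int) : Int :=
  let statuses := ((game_status moves).items.filter
      (fun p => PySem.Set.contains ((pyTRIPLETS.get? p.1).getD PySem.Set.empty) square)).map (·.2)
  let opp := py_opponent player
  -- value_matrix KeyError (my_count + opp_count > 2) is excluded by Pre_; getD defaults never used there
  let value := statuses.foldl (fun v st =>
      let my_count := (st.get? player).getD 0
      let opp_count := (st.get? opp).getD 0
      v + (((value_matrix_A.get? my_count).getD PySem.Dict.empty).get? opp_count).getD 0) 0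
  if in_an_xox_diag_attack moves && PySem.Set.contains pyCORNERS square then 0 else value

-- ===== PORT B =====
def tripletSets : List (PySem.Set Int) :=
  [PySem.Set.ofList [1,2,3], PySem.Set.ofList [4,5,6], PySem.Set.ofList [7,8,9],
   PySem.Set.ofList [1,4,7], PySem.Set.ofList [2,5,8], PySem.Set.ofList [3,6,9],
   PySem.Set.ofList [1,5,9], PySem.Set.ofList [3,5,7]]

def valueMatrixB : PySem.Dict Int (PySem.Dict Int Int) :=
  PySem.Dict.ofList [(0, PySem.Dict.ofList [(0,1),(1,100),(2,800)]),
                     (1, PySem.Dict.ofList [(0,50),(1,0)]),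
                     (2, PySem.Dict.ofList [(0,3000)])]

def xoxDiags : List (List Int) := [[1,5,9],[9,5,1],[7,5,3],[3,5,7]]

-- _bump: advance one line's (line, mine, theirs) entry by one fresh move
def svBump (player opp : String) (m : String × Int) (e : PySem.Set Int × Int × Int) :
    PySem.Set Int × Int × Int :=
  if !(PySem.Set.contains e.1 m.2) then e
  else if m.1 == player then (e.1, e.2.1 + 1, e.2.2)
  else if m.1 == opp then (e.1, e.2.1, e.2.2 + 1)
  else e

def square_value_alt (moves : List (String × Int)) (player : String) (square : Int) : Int :=
  -- KeyError cases (bad player, impossible count pair) are excluded by Pre_; getD defaults never used there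
  let opp := ((PySem.Dict.ofList [("X","O"),("O","X")]).get? player).getD ""
  let final := moves.foldl
    (fun (st : PySem.Set (String × Int) × List (PySem.Set Int × Int × Int)) move =>
      if PySem.Set.contains st.1 move then st
      else (PySem.Set.add st.1 move, st.2.map (svBump player opp move)))
    (PySem.Set.empty, (tripletSets.filter (fun t => PySem.Set.contains t square)).map (fun t => (t, (0:Int), (0:Int))))
  let value := (final.2.map (fun e =>
      (((valueMatrixB.get? e.2.1).getD PySem.Dict.empty).get? e.2.2).getD 0)).sum
  if PySem.Set.contains (PySem.Set.ofList [1,3,7,9]) square && xoxDiags.contains (moves.map (·.2))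
  then 0 else value

-- ===== PRECONDITION & SPEC =====
def pvCnt (moves : List (String × Int)) (p : String) (t : PySem.Set Int) : Int :=
  PySem.Set.len (PySem.Set.inter (PySem.Set.ofList ((moves.filter (fun m => m.1 == p)).map (·.2))) t)

-- Pre_ excludes exactly the inputs on which A raises KeyError: a player other than 'X'/'O',
-- or a triplet containing the square whose (mine, opponent) count pair is outside value_matrix
-- (equivalently, the two counts sum to more than 2).
def Pre_square_value (moves : List (String × Int)) (player : String) (square : Int) : Prop :=
  (player = "X" ∨ player = "O") ∧
  ∀ t ∈ tripletSets, PySem.Set.contains t square = true →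
    pvCnt moves "X" t + pvCnt moves "O" t ≤ 2
instance (moves : List (String × Int)) (player : String) (square : Int) : Decidable (Pre_square_value moves player square) := by unfold Pre_square_value; infer_instance

def pvWitness_square_value : (List (String × Int)) × String × Int := ([("X", 1), ("O", 9)], "X", 5)

def Spec_square_value (moves : List (String × Int)) (player : String) (square : Int) (out : Int) : Prop := out = square_value_alt moves player square
instance (moves : List (String × Int)) (player : String) (square : Int) (out : Int) : Decidable (Spec_square_value moves player square out) := by unfold Spec_square_value; infer_instance

-- ===== CLAIM (what is proved, stated in full; the proofs are below) =====
def Claim_equal_square_value : Prop := ∀ (moves : List (String × Int)) (player : String) (square : Int), Dom_square_value moves player square → Pre_square_value moves player square → Spec_square_value moves player square (square_value moves player square)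

-- ===== LEMMAS AND PROOFS =====

-- the 8 triplets paired with their names, in A's insertion order (proof-only bridge)
def pvL : List (String × PySem.Set Int) :=
  [("row1", PySem.Set.ofList [1,2,3]), ("row2", PySem.Set.ofList [4,5,6]),
   ("row3", PySem.Set.ofList [7,8,9]), ("col1", PySem.Set.ofList [1,4,7]),
   ("col2", PySem.Set.ofList [2,5,8]), ("col3", PySem.Set.ofList [3,6,9]),
   ("diag1", PySem.Set.ofList [1,5,9]), ("diag2", PySem.Set.ofList [3,5,7])]

lemma items_gs (moves : List (String × Int)) : (game_status moves).items =
    pvL.map (fun x => (x.1, triplet_status x.1 moves)) := rfl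

lemma trip_eq : tripletSets = pvL.map (·.2) := rfl

lemma cond_eq (moves : List (String × Int)) (square : Int) :
    (PySem.Set.contains (PySem.Set.ofList [1,3,7,9]) square && xoxDiags.contains (moves.map (·.2)))
    = (in_an_xox_diag_attack moves && PySem.Set.contains pyCORNERS square) := by
  simp only [in_an_xox_diag_attack, pyCORNERS, xoxDiags, Bool.and_comm]

-- number of FRESH moves in the list (not in seen, counted once) that pass `ok` and land in `t`
def pvExtra (ok : String × Int → Bool) (t : PySem.Set Int) :
    PySem.Set (String × Int) → List (String × Int) → Int
  | _, [] => 0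
  | seen, m :: ms =>
    (if PySem.Set.contains seen m then 0
     else if PySem.Set.contains t m.2 && ok m then 1 else 0)
      + pvExtra ok t (PySem.Set.add seen m) ms

lemma fold_counts (player opp : String) (moves : List (String × Int)) :
    ∀ (seen : PySem.Set (String × Int)) (cs : List (PySem.Set Int × Int × Int)),
    (moves.foldl
      (fun (st : PySem.Set (String × Int) × List (PySem.Set Int × Int × Int)) move =>
        if PySem.Set.contains st.1 move then st
        else (PySem.Set.add st.1 move, st.2.map (svBump player opp move)))
      (seen, cs)).2
    = cs.map (fun e => (e.1,
        e.2.1 + pvExtra (fun m => m.1 == player) e.1 seen moves,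
        e.2.2 + pvExtra (fun m => !(m.1 == player) && m.1 == opp) e.1 seen moves)) := by
  induction moves with
  | nil => intro seen cs; simp [pvExtra]
  | cons m ms ih =>
    intro seen cs
    by_cases h : PySem.Set.contains seen m = true
    · have hadd : PySem.Set.add seen m = seen :=
        PySem.Set.add_of_mem (List.mem_of_elem_eq_true h)
      simp only [List.foldl_cons, h, if_pos, pvExtra, hadd]
      rw [ih seen cs]
      simp
    · simp only [List.foldl_cons, h, if_neg, Bool.false_eq_true, not_false_iff,
        pvExtra]
      rw [ih (PySem.Set.add seen m) (cs.map (svBump player opp m)), List.map_map]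
      refine List.map_congr_left ?_
      intro e _
      have h' : m ∉ seen := fun hm => h (List.elem_eq_true_of_mem hm)
      by_cases h2 : m.2 ∈ e.1 <;> by_cases h3 : m.1 = player <;> by_cases h4 : m.1 = opp
      all_goals first
        | (simp [svBump, h', h2, h3, h4, Prod.ext_iff] <;> omega)
        | (have h5 : ¬ opp = player := fun hc => h3 (h4.trans hc)
           simp [svBump, h', h2, h3, h4, h5, Prod.ext_iff] <;> omega)

lemma contains_add_ne (seen : PySem.Set (String × Int)) {x m : String × Int} (hx : x ≠ m) :
    PySem.Set.contains (PySem.Set.add seen m) x = PySem.Set.contains seen x := by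
  apply Bool.eq_iff_iff.mpr
  simp [PySem.Set.mem_add, hx]

lemma countP_discard (L : List Int) (a : Int) (pt : Int → Bool) :
    (PySem.Set.discard (PySem.Set.ofList L) a).countP pt
      = (PySem.Set.ofList (L.filter (fun s => !(s == a)))).countP pt := by
  apply List.Perm.countP_eq
  apply (List.perm_ext_iff_of_nodup
    (PySem.Set.nodup_discard _ _ (PySem.Set.nodup_ofList _)) (PySem.Set.nodup_ofList _)).mpr
  intro b
  simp [PySem.Set.mem_discard, PySem.Set.mem_ofList, List.mem_filter, and_comm]

lemma pvExtra_eq (p : String) (ok : String × Int → Bool)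
    (hok : ∀ m : String × Int, ok m = (m.1 == p)) (t : PySem.Set Int) :
    ∀ (moves : List (String × Int)) (seen : PySem.Set (String × Int)),
    pvExtra ok t seen moves
    = (((PySem.Set.ofList ((moves.filter
          (fun m => !(PySem.Set.contains seen m) && m.1 == p)).map (·.2))).countP
        (fun s => PySem.Set.contains t s) : Nat) : Int) := by
  intro moves
  induction moves with
  | nil => intro seen; simp [pvExtra]
  | cons m ms ih =>
    intro seen
    by_cases h : PySem.Set.contains seen m = true
    · have hadd : PySem.Set.add seen m = seen :=
        PySem.Set.add_of_mem (List.mem_of_elem_eq_true h)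
      simp only [pvExtra, h, if_pos, List.filter_cons, Bool.not_true, Bool.false_and,
        Bool.false_eq_true, if_false, zero_add, hadd]
      exact ih seen
    · by_cases hp : (m.1 == p) = true
      · have hfil : ms.filter (fun x => !(PySem.Set.contains (PySem.Set.add seen m) x) && x.1 == p)
            = (ms.filter (fun x => !(PySem.Set.contains seen x) && x.1 == p)).filter
                (fun x => !(x.2 == m.2)) := by
          rw [List.filter_filter]
          refine List.filter_congr ?_
          intro x _
          by_cases hx : x = m
          · subst hx
            simp [PySem.Set.mem_add]
          · rw [contains_add_ne seen hx]
            by_cases hx2 : (x.2 == m.2) = true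
            · by_cases hx1 : (x.1 == p) = true
              · exfalso; apply hx
                have e1 : x.1 = p := by simpa using hx1
                have e2 : m.1 = p := by simpa using hp
                have e3 : x.2 = m.2 := by simpa using hx2
                exact Prod.ext (e1.trans e2.symm) e3
              · simp [hx1]
            · simp [hx2]
        have hmapfil : (((ms.filter (fun x => !(PySem.Set.contains seen x) && x.1 == p)).map (·.2)).filter
              (fun s => !(s == m.2)))
            = (ms.filter (fun x => !(PySem.Set.contains (PySem.Set.add seen m) x) && x.1 == p)).map (·.2) := by
          rw [hfil, List.filter_map]
          rfl
        simp only [pvExtra, h, Bool.false_eq_true, if_false, hok, hp, Bool.and_true,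
          List.filter_cons, Bool.not_false, if_pos, ih (PySem.Set.add seen m),
          List.map_cons, PySem.Set.ofList_cons, List.countP_cons]
        rw [countP_discard, hmapfil]
        by_cases ht : PySem.Set.contains t m.2 = true <;> simp [ht] <;> omega
      · have hfil2 : ms.filter (fun x => !(PySem.Set.contains (PySem.Set.add seen m) x) && x.1 == p)
            = ms.filter (fun x => !(PySem.Set.contains seen x) && x.1 == p) := by
          refine List.filter_congr ?_
          intro x _
          by_cases hx : x = m
          · subst hx; simp [hp]
          · rw [contains_add_ne seen hx]
        simp only [pvExtra, h, Bool.false_eq_true, if_false, hok, hp, Bool.and_false,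
          zero_add, List.filter_cons, Bool.not_false,
          ih (PySem.Set.add seen m), hfil2]

lemma pvExtra_empty_eq_cnt (p : String) (ok : String × Int → Bool)
    (hok : ∀ m : String × Int, ok m = (m.1 == p)) (t : PySem.Set Int)
    (moves : List (String × Int)) :
    pvExtra ok t PySem.Set.empty moves = pvCnt moves p t := by
  rw [pvExtra_eq p ok hok t moves PySem.Set.empty]
  have : (moves.filter (fun m => !(PySem.Set.contains PySem.Set.empty m) && m.1 == p))
      = moves.filter (fun m => m.1 == p) := by
    refine List.filter_congr ?_
    intro x _
    simp [PySem.Set.empty, PySem.Set.contains]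
  rw [this]
  simp [pvCnt, PySem.Set.inter, PySem.Set.len, List.countP_eq_length_filter]

lemma sv_eq_of_player (moves : List (String × Int)) (square : Int) (player : String)
    (hp : player = "X" ∨ player = "O") :
    square_value moves player square = square_value_alt moves player square := by
  have hokO : ∀ m : String × Int, (!(m.1 == "X") && (m.1 == "O")) = (m.1 == "O") := by
    intro m; by_cases h : m.1 = "O" <;> simp [h]
  have hokX : ∀ m : String × Int, (!(m.1 == "O") && (m.1 == "X")) = (m.1 == "X") := by
    intro m; by_cases h : m.1 = "X" <;> simp [h]
  rcases hp with rfl | rfl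
  · have hOpp : ((PySem.Dict.ofList [("X","O"),("O","X")]).get? "X").getD "" = "O" := rfl
    simp only [square_value, square_value_alt, items_gs, trip_eq, cond_eq, List.filter_map,
      PySem.List.foldl_add, List.map_map, zero_add, fold_counts, hOpp,
      pvExtra_empty_eq_cnt "X" (fun m : String × Int => m.1 == "X") (fun _ => rfl),
      pvExtra_empty_eq_cnt "O" (fun m : String × Int => !(m.1 == "X") && (m.1 == "O")) hokO]
    congr 1
    simp only [Function.comp_def]
    rw [List.filter_congr (q := fun x => PySem.Set.contains x.2 square)
        (by intro x hx; fin_cases hx <;> rfl)]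
    refine congrArg List.sum (List.map_congr_left ?_)
    intro x hx
    have hx' := List.mem_of_mem_filter hx
    fin_cases hx' <;> simp only [zero_add] <;> rfl
  · have hOpp : ((PySem.Dict.ofList [("X","O"),("O","X")]).get? "O").getD "" = "X" := rfl
    simp only [square_value, square_value_alt, items_gs, trip_eq, cond_eq, List.filter_map,
      PySem.List.foldl_add, List.map_map, zero_add, fold_counts, hOpp,
      pvExtra_empty_eq_cnt "O" (fun m : String × Int => m.1 == "O") (fun _ => rfl),
      pvExtra_empty_eq_cnt "X" (fun m : String × Int => !(m.1 == "O") && (m.1 == "X")) hokX]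
    congr 1
    simp only [Function.comp_def]
    rw [List.filter_congr (q := fun x => PySem.Set.contains x.2 square)
        (by intro x hx; fin_cases hx <;> rfl)]
    refine congrArg List.sum (List.map_congr_left ?_)
    intro x hx
    have hx' := List.mem_of_mem_filter hx
    fin_cases hx' <;> simp only [zero_add] <;> rfl

-- ===== VERDICT (by name: the statement is the Claim_ definition above) =====
theorem square_value_spec : Claim_equal_square_value := by
  intro moves player square _ hpre
  unfold Spec_square_value
  exact sv_eq_of_player moves square player hpre.1
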